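-- pv_equiv track=rewrite | github.com/hovteamable/timus-py3 | Some Words about Sport(1313).py | get_diagonal_array_string
-- ===== SOURCE A (Python) =====
-- def get_diagonal_array_string(n, m):
--     """
--
--     :param n: The matrix's size
--     :param m: The matrix
--     :type n: int
--     :type m : list
--     :return: String that represents array created by diagonal order of matrix
--     :rtype: str
--     """
--     diagonal_list = list()
--     for i in range(0, n, 1):
--         for j in range(0, i + 1, 1):
--             diagonal_list.append(m[i - j][j])
--
--     for j in range(1, n, 1):
--         first_index = n - 1
--         second_index = j
--         while first_index >= 0 and second_index < n:
--             diagonal_list.append(m[first_index][second_index])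
--             first_index -= 1
--             second_index += 1
--     diagonal_string = str()
--     for element in diagonal_list:
--         diagonal_string += str(element)
--         diagonal_string += " "
--
--     return diagonal_string
-- ===== SOURCE B (Python) =====
-- def get_diagonal_array_string(n, m):
--     """Bin-by-antidiagonal re-implementation: group elements by i+j, then emit."""
--     groups = [[] for _ in range(2 * n - 1)]
--     for i in range(n - 1, -1, -1):
--         for j in range(0, n):
--             groups[i + j].append(m[i][j])
--     diagonal_string = ""
--     for group in groups:
--         for element in group:
--             diagonal_string += str(element)
--             diagonal_string += " "
--     return diagonal_string
-- ===== Notes on version B (the rewrite author's own statement) =====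
-- stated objective: alternative
-- what changed: Replaces A's two-triangle coordinate walk (upper-triangle double loop plus a while-loop per lower diagonal) by binning elements into 2n-1 anti-diagonal buckets keyed by i+j (rows visited in descending order) and then emitting the buckets in order.
import Mathlib
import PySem

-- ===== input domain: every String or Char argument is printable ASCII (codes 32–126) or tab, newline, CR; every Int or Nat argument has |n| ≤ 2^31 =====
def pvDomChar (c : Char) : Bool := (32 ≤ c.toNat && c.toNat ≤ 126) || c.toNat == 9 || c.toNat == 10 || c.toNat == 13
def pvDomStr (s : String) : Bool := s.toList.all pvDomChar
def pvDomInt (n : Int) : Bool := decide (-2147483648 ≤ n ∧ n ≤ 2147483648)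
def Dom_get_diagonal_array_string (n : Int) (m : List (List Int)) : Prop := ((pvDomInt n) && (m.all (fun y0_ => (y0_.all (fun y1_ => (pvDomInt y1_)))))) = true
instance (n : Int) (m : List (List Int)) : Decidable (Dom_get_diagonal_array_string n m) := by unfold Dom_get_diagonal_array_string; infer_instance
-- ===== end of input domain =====

-- B replaces A's two-triangle coordinate walk by binning the elements into 2n-1
-- anti-diagonal buckets keyed by i+j (rows visited in descending order) and then
-- emitting the buckets in order: an alternative decomposition of the same cost.

-- ===== PORT A =====
-- the inner 'while first_index >= 0 and second_index < n' loop of A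
def pvAWhile (n : Int) (m : List (List Int)) (acc : List Int) (fi si : Int) : List Int :=
  if h : 0 ≤ fi ∧ si < n then
    pvAWhile n m (acc ++ [PySem.List.pyGetD (PySem.List.pyGetD m fi []) si 0]) (fi - 1) (si + 1)
  else acc
termination_by (fi + 1).toNat
decreasing_by omega

def get_diagonal_array_string (n : Int) (m : List (List Int)) : String :=
  let l1 := (PySem.List.pyRange 0 n 1).foldl (fun acc i =>
    (PySem.List.pyRange 0 (i + 1) 1).foldl (fun acc j =>
      acc ++ [PySem.List.pyGetD (PySem.List.pyGetD m (i - j) []) j 0]) acc) []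
  let l2 := (PySem.List.pyRange 1 n 1).foldl (fun acc j => pvAWhile n m acc (n - 1) j) l1
  l2.foldl (fun s e => s ++ PySem.Int.toStr e ++ " ") ""

-- ===== PORT B =====
def get_diagonal_array_string_alt (n : Int) (m : List (List Int)) : String :=
  let groups0 := (PySem.List.pyRange 0 (2 * n - 1) 1).map (fun _ => ([] : List Int))
  let groups := (PySem.List.pyRange (n - 1) (-1) (-1)).foldl (fun gs i =>
    (PySem.List.pyRange 0 n 1).foldl (fun gs j =>
      PySem.List.pySetD gs (i + j)
        (PySem.List.pyGetD gs (i + j) [] ++ [PySem.List.pyGetD (PySem.List.pyGetD m i []) j 0])) gs)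
    groups0
  groups.foldl (fun s g => g.foldl (fun s e => s ++ PySem.Int.toStr e ++ " ") s) ""

-- ===== PRECONDITION & SPEC =====
-- exactly the inputs on which A returns: every access m[r][c], 0 ≤ r,c < n, is in range (IndexError otherwise)
def Pre_get_diagonal_array_string (n : Int) (m : List (List Int)) : Prop :=
  n ≤ (m.length : Int) ∧ ∀ row ∈ m.take n.toNat, n ≤ (row.length : Int)
instance (n : Int) (m : List (List Int)) : Decidable (Pre_get_diagonal_array_string n m) := by unfold Pre_get_diagonal_array_string; infer_instance
def pvWitness_get_diagonal_array_string : Int × List (List Int) := (2, [[1, 2], [3, 4]])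

def Spec_get_diagonal_array_string (n : Int) (m : List (List Int)) (out : String) : Prop := out = get_diagonal_array_string_alt n m
instance (n : Int) (m : List (List Int)) (out : String) : Decidable (Spec_get_diagonal_array_string n m out) := by unfold Spec_get_diagonal_array_string; infer_instance

-- ===== CLAIM (what is proved, stated in full; the proofs are below) =====
def Claim_equal_get_diagonal_array_string : Prop := ∀ (n : Int) (m : List (List Int)), Dom_get_diagonal_array_string n m → Pre_get_diagonal_array_string n m → Spec_get_diagonal_array_string n m (get_diagonal_array_string n m)

-- ===== LEMMAS AND PROOFS =====

-- the matrix entry m[r][c] as both ports read it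
def pvE (m : List (List Int)) (r c : Int) : Int :=
  PySem.List.pyGetD (PySem.List.pyGetD m r []) c 0

-- anti-diagonal k of the n×n matrix, rows descending (canonical form both ports reduce to)
def pvDiag (n : Int) (m : List (List Int)) (k : Int) : List Int :=
  (List.range (min (k + 1) n - max 0 (k - n + 1)).toNat).map
    (fun t : Nat => pvE m (min (n - 1) k - (t : Int)) (k - min (n - 1) k + (t : Int)))

-- the concatenation of all anti-diagonals in order
def pvAll (n : Int) (m : List (List Int)) : List (List Int) :=
  (PySem.List.pyRange 0 (2 * n - 1) 1).map (pvDiag n m)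

-- the string-building step shared by both ports
def pvStep (s : String) (e : Int) : String := s ++ PySem.Int.toStr e ++ " "

lemma pvA_inner (n : Int) (m : List (List Int)) (i : Int) (h1 : i ≤ n - 1)
    (acc : List Int) :
    (PySem.List.pyRange 0 (i + 1) 1).foldl
      (fun acc j => acc ++ [PySem.List.pyGetD (PySem.List.pyGetD m (i - j) []) j 0]) acc
    = acc ++ pvDiag n m i := by
  rw [PySem.List.foldl_append_singleton_eq_map]
  congr 1
  unfold pvDiag
  rw [show min (i + 1) n = i + 1 from by omega, show max 0 (i - n + 1) = 0 from by omega,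
      show min (n - 1) i = i from by omega]
  rw [PySem.List.pyRange_one, List.map_map]
  apply List.map_congr_left
  intro t _
  simp [pvE]

lemma pvA_while (n : Int) (m : List (List Int)) :
    ∀ (N : Nat) (fi si : Int) (acc : List Int), (fi + 1).toNat ≤ N →
    n - 1 ≤ fi + si → 0 ≤ si →
    pvAWhile n m acc fi si
      = acc ++ (PySem.List.pyRange si n 1).map (fun c => pvE m (fi + si - c) c) := by
  intro N
  induction N with
  | zero =>
    intro fi si acc hN h1 h2
    rw [pvAWhile, dif_neg (by omega), PySem.List.pyRange_one_eq_nil (by omega),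
        List.map_nil, List.append_nil]
  | succ N ih =>
    intro fi si acc hN h1 h2
    rw [pvAWhile]
    by_cases hc : 0 ≤ fi ∧ si < n
    · rw [dif_pos hc, ih _ _ _ (by omega) (by omega) (by omega)]
      rw [show fi - 1 + (si + 1) = fi + si from by ring]
      rw [PySem.List.pyRange_one_cons hc.2, List.map_cons]
      simp [pvE]
    · rw [dif_neg hc]
      have hsi : n ≤ si := by
        rcases not_and_or.mp hc with h | h
        · omega
        · omega
      rw [PySem.List.pyRange_one_eq_nil (by omega), List.map_nil, List.append_nil]

lemma pvA_eq_all (n : Int) (m : List (List Int)) :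
    ((PySem.List.pyRange 1 n 1).foldl (fun acc j => pvAWhile n m acc (n - 1) j)
      ((PySem.List.pyRange 0 n 1).foldl (fun acc i =>
        (PySem.List.pyRange 0 (i + 1) 1).foldl (fun acc j =>
          acc ++ [PySem.List.pyGetD (PySem.List.pyGetD m (i - j) []) j 0]) acc) []))
    = (pvAll n m).flatten := by
  by_cases hn : n ≤ 0
  · rw [PySem.List.pyRange_one_eq_nil (show (n:Int) ≤ 1 from by omega),
        PySem.List.pyRange_one_eq_nil (show (n:Int) ≤ 0 from hn)]
    unfold pvAll
    rw [PySem.List.pyRange_one_eq_nil (show (2*n - 1 : Int) ≤ 0 from by omega)]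
    simp
  · rw [not_le] at hn
    -- first triangle: diagonals 0 .. n-1
    have h1 : (PySem.List.pyRange 0 n 1).foldl (fun acc i =>
        (PySem.List.pyRange 0 (i + 1) 1).foldl (fun acc j =>
          acc ++ [PySem.List.pyGetD (PySem.List.pyGetD m (i - j) []) j 0]) acc) []
        = ((PySem.List.pyRange 0 n 1).map (pvDiag n m)).flatten := by
      rw [PySem.List.foldl_congr_mem _ _ (fun acc i => acc ++ pvDiag n m i) _
        (by
          intro acc i hi
          rw [PySem.List.mem_pyRange_one] at hi
          exact pvA_inner n m i (by omega) acc)]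
      rw [PySem.List.foldl_append_eq_flatMap, List.nil_append, List.flatMap_def]
    -- second part: diagonals n .. 2n-2
    have h2 : ∀ (init : List Int), (PySem.List.pyRange 1 n 1).foldl
        (fun acc j => pvAWhile n m acc (n - 1) j) init
        = init ++ ((PySem.List.pyRange n (2 * n - 1) 1).map (pvDiag n m)).flatten := by
      intro init
      rw [PySem.List.foldl_congr_mem _ _ (fun acc j => acc ++ pvDiag n m (n - 1 + j)) _
        (by
          intro acc j hj
          rw [PySem.List.mem_pyRange_one] at hj
          rw [pvA_while n m (n + 1).toNat (n - 1) j acc (by omega) (by omega) (by omega)]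
          congr 1
          unfold pvDiag
          rw [show min (n - 1 + j + 1) n = n from by omega,
              show max 0 (n - 1 + j - n + 1) = j from by omega,
              show min (n - 1) (n - 1 + j) = n - 1 from by omega]
          rw [PySem.List.pyRange_one, List.map_map]
          apply List.map_congr_left
          intro t _
          simp only [Function.comp]
          congr 1 <;> omega)]
      rw [PySem.List.foldl_append_eq_flatMap]
      congr 1
      rw [← List.flatMap_def]
      rw [PySem.List.pyRange_one 1 n, PySem.List.pyRange_one n (2 * n - 1),
          List.flatMap_map, List.flatMap_map]
      rw [show (2 * n - 1 - n : Int) = n - 1 from by ring]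
      rw [List.flatMap_def, List.flatMap_def]
      congr 1
      apply List.map_congr_left
      intro a _
      congr 1
      omega
    rw [h1, h2]
    unfold pvAll
    rw [PySem.List.pyRange_one_append 0 n (2 * n - 1) (by omega) (by omega),
        List.map_append, List.flatten_append]

-- B's inner loop over j fills each bucket i+j once
lemma pvB_inner (n : Int) (m : List (List Int)) (i : Int) (hi0 : 0 ≤ i) (hi1 : i ≤ n - 1) :
    ∀ (N : Nat) (a : Int) (gs : List (List Int)), (n - a).toNat ≤ N → 0 ≤ a →
    gs.length = (2 * n - 1).toNat →
    ((PySem.List.pyRange a n 1).foldl (fun gs j =>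
        PySem.List.pySetD gs (i + j)
          (PySem.List.pyGetD gs (i + j) [] ++ [PySem.List.pyGetD (PySem.List.pyGetD m i []) j 0])) gs).length
      = gs.length
    ∧ ∀ (k : Int), 0 ≤ k → k < (gs.length : Int) →
      PySem.List.pyGetD ((PySem.List.pyRange a n 1).foldl (fun gs j =>
        PySem.List.pySetD gs (i + j)
          (PySem.List.pyGetD gs (i + j) [] ++ [PySem.List.pyGetD (PySem.List.pyGetD m i []) j 0])) gs) k []
      = PySem.List.pyGetD gs k [] ++ (if a ≤ k - i ∧ k - i < n then [pvE m i (k - i)] else []) := by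
  intro N
  induction N with
  | zero =>
    intro a gs hN ha hlen
    rw [PySem.List.pyRange_one_eq_nil (by omega)]
    refine ⟨rfl, ?_⟩
    intro k hk0 hk1
    rw [if_neg (show ¬ (a ≤ k - i ∧ k - i < n) from by omega)]
    simp
  | succ N ih =>
    intro a gs hN ha hlen
    by_cases hc : a < n
    · rw [PySem.List.pyRange_one_cons hc, List.foldl_cons]
      have hlen' : (PySem.List.pySetD gs (i + a)
          (PySem.List.pyGetD gs (i + a) [] ++ [PySem.List.pyGetD (PySem.List.pyGetD m i []) a 0])).length
          = gs.length := PySem.List.length_pySetD _ _ _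
      obtain ⟨hL, hG⟩ := ih (a + 1) (PySem.List.pySetD gs (i + a)
          (PySem.List.pyGetD gs (i + a) [] ++ [PySem.List.pyGetD (PySem.List.pyGetD m i []) a 0]))
        (by omega) (by omega) (by rw [hlen']; exact hlen)
      refine ⟨by rw [hL, hlen'], ?_⟩
      intro k hk0 hk1
      rw [hG k hk0 (by rw [hlen']; exact hk1)]
      rw [PySem.List.pySetD_of_nonneg _ _ (by omega)]
      have hk1' : k < (((gs.set (i + a).toNat
          (PySem.List.pyGetD gs (i + a) [] ++ [PySem.List.pyGetD (PySem.List.pyGetD m i []) a 0])).length : Nat) : Int) := by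
        rw [List.length_set]; exact hk1
      rw [PySem.List.pyGetD_eq_getElem _ _ hk0 hk1', PySem.List.pyGetD_eq_getElem _ _ hk0 hk1]
      rw [List.getElem_set]
      by_cases hk : (i + a).toNat = k.toNat
      · rw [if_pos hk]
        rw [if_neg (show ¬ (a + 1 ≤ k - i ∧ k - i < n) from by omega),
            if_pos (show a ≤ k - i ∧ k - i < n from by omega)]
        rw [PySem.List.pyGetD_eq_getElem _ _ (by omega) (by omega)]
        simp [pvE, hk, show k - i = a from by omega]
      · rw [if_neg hk]
        by_cases hc2 : a + 1 ≤ k - i ∧ k - i < n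
        · rw [if_pos hc2, if_pos (show a ≤ k - i ∧ k - i < n from by omega)]
        · rw [if_neg hc2, if_neg (show ¬ (a ≤ k - i ∧ k - i < n) from by omega)]
    · rw [PySem.List.pyRange_one_eq_nil (by omega)]
      refine ⟨rfl, ?_⟩
      intro k hk0 hk1
      rw [if_neg (show ¬ (a ≤ k - i ∧ k - i < n) from by omega)]
      simp

-- partial diagonal: rows from min a k down to (exclusive) max (-1) (k-n)
def pvSeg (n : Int) (m : List (List Int)) (a k : Int) : List Int :=
  (PySem.List.pyRange (min a k) (max (-1) (k - n)) (-1)).map (fun i => pvE m i (k - i))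

lemma pvB_outer (n : Int) (m : List (List Int)) :
    ∀ (N : Nat) (a : Int) (gs : List (List Int)), (a + 1).toNat ≤ N → a ≤ n - 1 →
    gs.length = (2 * n - 1).toNat →
    ((PySem.List.pyRange a (-1) (-1)).foldl (fun gs i =>
        (PySem.List.pyRange 0 n 1).foldl (fun gs j =>
          PySem.List.pySetD gs (i + j)
            (PySem.List.pyGetD gs (i + j) [] ++ [PySem.List.pyGetD (PySem.List.pyGetD m i []) j 0])) gs) gs).length
      = gs.length
    ∧ ∀ (k : Int), 0 ≤ k → k < (gs.length : Int) →
      PySem.List.pyGetD ((PySem.List.pyRange a (-1) (-1)).foldl (fun gs i =>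
        (PySem.List.pyRange 0 n 1).foldl (fun gs j =>
          PySem.List.pySetD gs (i + j)
            (PySem.List.pyGetD gs (i + j) [] ++ [PySem.List.pyGetD (PySem.List.pyGetD m i []) j 0])) gs) gs) k []
      = PySem.List.pyGetD gs k [] ++ pvSeg n m a k := by
  intro N
  induction N with
  | zero =>
    intro a gs hN ha hlen
    rw [PySem.List.pyRange_neg_one_eq_nil (by omega)]
    refine ⟨rfl, ?_⟩
    intro k hk0 hk1
    unfold pvSeg
    rw [PySem.List.pyRange_neg_one_eq_nil (by omega), List.map_nil, List.append_nil]
    rfl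
  | succ N ih =>
    intro a gs hN ha hlen
    by_cases hc : 0 ≤ a
    · rw [PySem.List.pyRange_neg_one_cons (by omega), List.foldl_cons]
      obtain ⟨hiL, hiG⟩ := pvB_inner n m a hc ha (n + 1).toNat 0 gs (by omega) (by omega) hlen
      obtain ⟨hL, hG⟩ := ih (a - 1)
        ((PySem.List.pyRange 0 n 1).foldl (fun gs j =>
          PySem.List.pySetD gs (a + j)
            (PySem.List.pyGetD gs (a + j) [] ++ [PySem.List.pyGetD (PySem.List.pyGetD m a []) j 0])) gs)
        (by omega) (by omega) (by rw [hiL]; exact hlen)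
      refine ⟨by rw [hL, hiL], ?_⟩
      intro k hk0 hk1
      rw [hG k hk0 (by rw [hiL]; exact hk1), hiG k hk0 hk1]
      rw [List.append_assoc]
      congr 1
      unfold pvSeg
      by_cases h2 : 0 ≤ k - a ∧ k - a < n
      · rw [if_pos h2]
        rw [show min a k = a from by omega]
        rw [PySem.List.pyRange_neg_one_cons (show max (-1) (k - n) < a from by omega)]
        rw [List.map_cons]
        rw [show min (a - 1) k = a - 1 from by omega]
        simp [pvE]
      · rw [if_neg h2, List.nil_append]
        rcases not_and_or.mp h2 with h3 | h3
        · rw [show min a k = min (a - 1) k from by omega]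
        · rw [PySem.List.pyRange_neg_one_eq_nil (show min a k ≤ max (-1) (k - n) from by omega),
              PySem.List.pyRange_neg_one_eq_nil (show min (a - 1) k ≤ max (-1) (k - n) from by omega)]
    · rw [PySem.List.pyRange_neg_one_eq_nil (by omega)]
      refine ⟨rfl, ?_⟩
      intro k hk0 hk1
      unfold pvSeg
      rw [PySem.List.pyRange_neg_one_eq_nil (by omega), List.map_nil, List.append_nil]
      rfl

lemma pvSeg_eq_diag (n : Int) (m : List (List Int)) (k : Int) :
    pvSeg n m (n - 1) k = pvDiag n m k := by
  unfold pvSeg pvDiag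
  rw [PySem.List.pyRange_neg_one, List.map_map]
  rw [show min (n - 1) k - max (-1) (k - n) = min (k + 1) n - max 0 (k - n + 1) from by omega]
  apply List.map_congr_left
  intro t _
  simp only [Function.comp]
  congr 1
  omega

lemma pvB_groups (n : Int) (m : List (List Int)) :
    ((PySem.List.pyRange (n - 1) (-1) (-1)).foldl (fun gs i =>
      (PySem.List.pyRange 0 n 1).foldl (fun gs j =>
        PySem.List.pySetD gs (i + j)
          (PySem.List.pyGetD gs (i + j) [] ++ [PySem.List.pyGetD (PySem.List.pyGetD m i []) j 0])) gs)
      ((PySem.List.pyRange 0 (2 * n - 1) 1).map (fun _ => ([] : List Int))))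
    = pvAll n m := by
  by_cases hn : 0 < n
  · have hlen0 : ((PySem.List.pyRange 0 (2 * n - 1) 1).map (fun _ => ([] : List Int))).length
        = (2 * n - 1).toNat := by
      rw [List.length_map, PySem.List.length_pyRange_one]; omega
    obtain ⟨hL, hG⟩ := pvB_outer n m n.toNat (n - 1)
      ((PySem.List.pyRange 0 (2 * n - 1) 1).map (fun _ => ([] : List Int)))
      (by omega) (by omega) hlen0
    apply List.ext_getElem
    · rw [hL, hlen0]
      unfold pvAll
      rw [List.length_map, PySem.List.length_pyRange_one]
      omega
    · intro k h1 h2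
      have hkI : ((k : Int)) < ((((PySem.List.pyRange 0 (2 * n - 1) 1).map
          (fun _ => ([] : List Int))).length : Nat) : Int) := by
        rw [hlen0]
        rw [hL, hlen0] at h1
        omega
      have hg := hG (k : Int) (by omega) hkI
      rw [PySem.List.pyGetD_eq_getElem _ _ (by omega) (by omega)] at hg
      rw [PySem.List.pyGetD_map_pyRange_of_nonneg _ _ _ _ (by omega)
        (by rw [hL, hlen0] at h1; omega)] at hg
      rw [List.nil_append] at hg
      simp only [Int.toNat_natCast] at hg
      rw [hg]
      unfold pvAll
      rw [List.getElem_map, PySem.List.getElem_pyRange_one]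
      rw [pvSeg_eq_diag n m (k : Int)]
      rw [show (0 : Int) + (k : Int) = (k : Int) from by omega]
  · rw [PySem.List.pyRange_neg_one_eq_nil (by omega)]
    unfold pvAll
    rw [PySem.List.pyRange_one_eq_nil (by omega), PySem.List.pyRange_one_eq_nil (by omega)]
    simp

-- ===== VERDICT (by name: the statement is the Claim_ definition above) =====
theorem get_diagonal_array_string_spec : Claim_equal_get_diagonal_array_string := by
  intro n m _ _
  unfold Spec_get_diagonal_array_string
  simp only [get_diagonal_array_string, get_diagonal_array_string_alt]
  rw [pvA_eq_all n m, pvB_groups n m]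
  simp only [List.foldl_flatten]
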